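-- pv_equiv track=rewrite | github.com/troniixx/uzh | Softwaresystems/Informatik1/Actual Midterm/organize.py | organise
-- ===== SOURCE A (Python) =====
-- def organise(records):
--     # { user: {shop -> {day -> counter}}}
--     res = {}
--     for person, shop, day in records:
--         if person and shop and (0 < day < 8):
--             if person not in res:
--                 res[person] = {}
--             if shop not in res[person]:
--                 res[person][shop] = {}
--             if day not in res[person][shop]:
--                 res[person][shop][day] = 0
--             res[person][shop][day] += 1
--     return res
-- ===== SOURCE B (Python) =====
-- def organise(records):
--     # pass 1: flat counter keyed by the (person, shop, day) triple
--     counts = {}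
--     for person, shop, day in records:
--         if person and shop and (0 < day < 8):
--             key = (person, shop, day)
--             counts[key] = counts.get(key, 0) + 1
--     # pass 2: reshape the flat counts into the nested dict
--     res = {}
--     for (person, shop, day), c in counts.items():
--         shops = res.get(person, {})
--         days = shops.get(shop, {})
--         days[day] = c
--         shops[shop] = days
--         res[person] = shops
--     return res
-- ===== Notes on version B (the rewrite author's own statement) =====
-- stated objective: alternative
-- what changed: A builds the nested person->shop->day dict incrementally while counting; B first builds a flat counter keyed by the (person, shop, day) triple in one pass, then reshapes that flat mapping into the nested dict in a separate second pass.
import Mathlib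
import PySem

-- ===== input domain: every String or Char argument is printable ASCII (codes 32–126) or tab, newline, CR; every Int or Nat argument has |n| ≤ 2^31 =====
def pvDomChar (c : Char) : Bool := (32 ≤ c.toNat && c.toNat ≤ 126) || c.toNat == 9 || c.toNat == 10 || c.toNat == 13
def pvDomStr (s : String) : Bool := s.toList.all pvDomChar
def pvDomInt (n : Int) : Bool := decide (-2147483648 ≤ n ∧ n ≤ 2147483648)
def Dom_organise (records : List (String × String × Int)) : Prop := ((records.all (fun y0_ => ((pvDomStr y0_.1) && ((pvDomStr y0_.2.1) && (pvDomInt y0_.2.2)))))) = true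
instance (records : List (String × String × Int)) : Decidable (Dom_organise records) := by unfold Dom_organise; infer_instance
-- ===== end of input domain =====

-- B rebuilds A's nested dict by a flat one-pass counter plus a separate reshaping pass (objective: alternative decomposition; return values proved equal).

abbrev DDay : Type := PySem.Dict Int Int
abbrev DShop : Type := PySem.Dict String DDay
abbrev DTop : Type := PySem.Dict String DShop

-- rendering of the returned nested dict as nested association lists (type convention; shared output boilerplate)
def toPlain (res : DTop) : List (String × List (String × List (Int × Int))) :=
  res.items.map (fun pd => (pd.1, pd.2.items.map (fun sd => (sd.1, sd.2.items))))

-- ===== PORT A =====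
-- loop body of A: ensure res[person], res[person][shop], res[person][shop][day] exist, then += 1
def organiseStepA (res : DTop) (r : String × String × Int) : DTop :=
  match r with
  | (person, shop, day) =>
    if person ≠ "" ∧ shop ≠ "" ∧ (0 < day ∧ day < 8) then
      let res1 := if res.contains person then res else res.insert person PySem.Dict.empty
      let d1 := res1.getD person PySem.Dict.empty
      let d1 := if d1.contains shop then d1 else d1.insert shop PySem.Dict.empty
      let d2 := d1.getD shop PySem.Dict.empty
      let d2 := if d2.contains day then d2 else d2.insert day 0
      let d2 := d2.modify day 0 (· + 1)
      res1.insert person (d1.insert shop d2)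
    else res

def organise (records : List (String × String × Int)) : List (String × List (String × List (Int × Int))) :=
  toPlain (records.foldl organiseStepA PySem.Dict.empty)

-- ===== PORT B =====
-- second pass of B: put one flat (person, shop, day) -> count entry into the nested dict
def organiseStepB (res : DTop) (item : (String × String × Int) × Int) : DTop :=
  match item with
  | ((person, shop, day), c) =>
    let shops := res.getD person PySem.Dict.empty
    let days := shops.getD shop PySem.Dict.empty
    res.insert person (shops.insert shop (days.insert day c))

def organise_alt (records : List (String × String × Int)) : List (String × List (String × List (Int × Int))) :=
  let counts : PySem.Dict (String × String × Int) Int :=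
    records.foldl (fun counts r =>
      match r with
      | (person, shop, day) =>
        if person ≠ "" ∧ shop ≠ "" ∧ (0 < day ∧ day < 8) then
          counts.insert (person, shop, day) (counts.getD (person, shop, day) 0 + 1)
        else counts) PySem.Dict.empty
  toPlain (counts.items.foldl organiseStepB PySem.Dict.empty)

-- ===== PRECONDITION & SPEC =====
def Spec_organise (records : List (String × String × Int)) (out : List (String × List (String × List (Int × Int)))) : Prop := out = organise_alt records
instance (records : List (String × String × Int)) (out : List (String × List (String × List (Int × Int)))) : Decidable (Spec_organise records out) := by unfold Spec_organise; infer_instance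

-- ===== CLAIM (what is proved, stated in full; the proofs are below) =====
def Claim_equal_organise : Prop := ∀ (records : List (String × String × Int)), Dom_organise records → Spec_organise records (organise records)

-- ===== LEMMAS AND PROOFS =====

def pvGuard (r : String × String × Int) : Bool :=
  decide (r.1 ≠ "" ∧ r.2.1 ≠ "" ∧ (0 < r.2.2 ∧ r.2.2 < 8))
def pathGetD (res : DTop) (r : String × String × Int) : Int :=
  ((res.getD r.1 PySem.Dict.empty).getD r.2.1 PySem.Dict.empty).getD r.2.2 0

theorem ensure_getD {κ ν : Type} [BEq κ] [LawfulBEq κ] (d : PySem.Dict κ ν) (k : κ) (v : ν) :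
    (if d.contains k then d else d.insert k v).getD k v = d.getD k v := by
  by_cases h : d.contains k = true
  · simp [h]
  · simp only [Bool.not_eq_true] at h
    simp [h, PySem.Dict.getD_insert_self, PySem.Dict.getD_of_not_contains d v h]

theorem ensure_insert {κ ν : Type} [BEq κ] [LawfulBEq κ] (d : PySem.Dict κ ν) (k : κ) (v w : ν) :
    (if d.contains k then d else d.insert k v).insert k w = d.insert k w := by
  by_cases h : d.contains k = true
  · simp [h]
  · simp [h, PySem.Dict.insert_insert_self]

theorem stepA_eq (res : DTop) (r : String × String × Int) (h : pvGuard r = true) :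
    organiseStepA res r = organiseStepB res (r, pathGetD res r + 1) := by
  obtain ⟨p, s, d⟩ := r
  simp only [pvGuard, decide_eq_true_eq] at h
  simp only [organiseStepA, organiseStepB, pathGetD, if_pos h, PySem.Dict.modify,
    ensure_getD, ensure_insert]

def pathContains (res : DTop) (r : String × String × Int) : Prop :=
  res.contains r.1 = true ∧ (res.getD r.1 PySem.Dict.empty).contains r.2.1 = true ∧
    ((res.getD r.1 PySem.Dict.empty).getD r.2.1 PySem.Dict.empty).contains r.2.2 = true

theorem stepB_eq (res : DTop) (r : String × String × Int) (c : Int) :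
    organiseStepB res (r, c) =
      res.insert r.1 ((res.getD r.1 PySem.Dict.empty).insert r.2.1
        (((res.getD r.1 PySem.Dict.empty).getD r.2.1 PySem.Dict.empty).insert r.2.2 c)) := by
  obtain ⟨p, s, d⟩ := r; rfl

theorem insert_comm_of_contains {κ ν : Type} [BEq κ] [LawfulBEq κ] (d : PySem.Dict κ ν)
    {k k' : κ} (v w : ν) (h : d.contains k = true) (hne : k' ≠ k) :
    (d.insert k v).insert k' w = (d.insert k' w).insert k v := by
  have hbne : (k' == k) = false := beq_eq_false_iff_ne.mpr hne
  have hbne' : (k == k') = false := beq_eq_false_iff_ne.mpr (Ne.symm hne)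
  apply PySem.Dict.ext
  by_cases h' : d.contains k' = true
  · rw [PySem.Dict.items_insert_of_contains _ w (by simp [PySem.Dict.contains_insert, h']),
      PySem.Dict.items_insert_of_contains _ v h,
      PySem.Dict.items_insert_of_contains _ v (by simp [PySem.Dict.contains_insert, h]),
      PySem.Dict.items_insert_of_contains _ w h']
    simp only [List.map_map]
    apply List.map_congr_left
    intro p _
    by_cases hp : p.1 = k <;> by_cases hp' : p.1 = k' <;>
      simp_all [Function.comp]
  · simp only [Bool.not_eq_true] at h'
    rw [PySem.Dict.items_insert_of_not_contains _ w
        (by simp [PySem.Dict.contains_insert, h', hbne]),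
      PySem.Dict.items_insert_of_contains _ v h,
      PySem.Dict.items_insert_of_contains _ v
        (by simp [PySem.Dict.contains_insert, h]),
      PySem.Dict.items_insert_of_not_contains _ w h',
      List.map_append]
    simp [hbne]

theorem pathGetD_stepB (res : DTop) (q : (String × String × Int) × Int) (r : String × String × Int) :
    pathGetD (organiseStepB res q) r = if r = q.1 then q.2 else pathGetD res r := by
  obtain ⟨⟨p, s, d⟩, c⟩ := q
  obtain ⟨p', s', d'⟩ := r
  simp only [stepB_eq, pathGetD, PySem.Dict.getD_insert]
  by_cases hp : p' = p <;> by_cases hs : s' = s <;> by_cases hd : d' = d <;>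
    simp [hp, hs, hd, Prod.ext_iff, PySem.Dict.getD_insert]

theorem pathContains_stepB_mono (res : DTop) (q : (String × String × Int) × Int)
    (r : String × String × Int) (h : pathContains res r) : pathContains (organiseStepB res q) r := by
  obtain ⟨⟨p, s, d⟩, c⟩ := q
  obtain ⟨p', s', d'⟩ := r
  obtain ⟨h1, h2, h3⟩ := h
  by_cases hp : p' = p <;> by_cases hs : s' = s <;>
    refine ⟨?_, ?_, ?_⟩ <;>
      simp_all [stepB_eq, PySem.Dict.getD_insert, PySem.Dict.contains_insert]

theorem pathContains_stepB_self (res : DTop) (q : (String × String × Int) × Int) :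
    pathContains (organiseStepB res q) q.1 := by
  obtain ⟨⟨p, s, d⟩, c⟩ := q
  refine ⟨?_, ?_, ?_⟩ <;>
    simp [stepB_eq, PySem.Dict.getD_insert_self]

theorem stepB_stepB_self (res : DTop) (r : String × String × Int) (k c : Int) :
    organiseStepB (organiseStepB res (r, k)) (r, c) = organiseStepB res (r, c) := by
  obtain ⟨p, s, d⟩ := r
  simp [stepB_eq, PySem.Dict.getD_insert_self, PySem.Dict.insert_insert_self]

theorem stepB_comm (res : DTop) (r : String × String × Int) (c : Int)
    (q : (String × String × Int) × Int) (hr : pathContains res r) (hne : q.1 ≠ r) :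
    organiseStepB (organiseStepB res (r, c)) q = organiseStepB (organiseStepB res q) (r, c) := by
  obtain ⟨p, s, d⟩ := r
  obtain ⟨⟨p', s', d'⟩, c'⟩ := q
  obtain ⟨h1, h2, h3⟩ := hr
  by_cases hp : p' = p
  · subst hp
    by_cases hs : s' = s
    · subst hs
      have hd : d' ≠ d := by simpa [Prod.ext_iff] using hne
      simp only [stepB_eq, PySem.Dict.getD_insert_self, PySem.Dict.insert_insert_self]
      rw [insert_comm_of_contains _ _ _ h3 hd]
    · simp only [stepB_eq, PySem.Dict.getD_insert_self, PySem.Dict.insert_insert_self,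
        PySem.Dict.getD_insert_of_ne _ _ _ hs,
        PySem.Dict.getD_insert_of_ne _ _ _ (Ne.symm hs)]
      rw [insert_comm_of_contains _ _ _ h2 hs]
  · simp only [stepB_eq, PySem.Dict.getD_insert_of_ne _ _ _ hp,
      PySem.Dict.getD_insert_of_ne _ _ _ (Ne.symm hp)]
    rw [insert_comm_of_contains _ _ _ h1 hp]

theorem foldB_insert_comm (items : List ((String × String × Int) × Int)) (res : DTop)
    (r : String × String × Int) (c : Int) (hr : pathContains res r)
    (hk : ∀ q ∈ items, q.1 ≠ r) :
    items.foldl organiseStepB (organiseStepB res (r, c)) =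
      organiseStepB (items.foldl organiseStepB res) (r, c) := by
  induction items generalizing res with
  | nil => rfl
  | cons q rest ih =>
    simp only [List.foldl_cons]
    rw [stepB_comm res r c q hr (hk q (by simp))]
    exact ih (organiseStepB res q) (pathContains_stepB_mono res q r hr)
      (fun q' hq' => hk q' (by simp [hq']))

theorem stepA_not_guard (res : DTop) (r : String × String × Int) (h : pvGuard r = false) :
    organiseStepA res r = res := by
  obtain ⟨p, s, d⟩ := r
  simp only [pvGuard, decide_eq_false_iff_not] at h
  simp only [organiseStepA, if_neg h]

theorem pathGetD_foldA (vs : List (String × String × Int)) (hg : ∀ r ∈ vs, pvGuard r = true)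
    (r : String × String × Int) :
    pathGetD (vs.foldl organiseStepA PySem.Dict.empty) r = (vs.count r : Int) := by
  induction vs using List.reverseRecOn generalizing r with
  | nil => simp [pathGetD, PySem.Dict.getD_empty]
  | append_singleton vs q ih =>
    have hgvs : ∀ x ∈ vs, pvGuard x = true := fun x hx => hg x (by simp [hx])
    have hgq : pvGuard q = true := hg q (by simp)
    rw [List.foldl_append, List.foldl_cons, List.foldl_nil, stepA_eq _ q hgq, pathGetD_stepB]
    by_cases hrq : r = q
    · subst hrq
      simp [ih hgvs, List.count_append]
    · simp [hrq, ih hgvs, List.count_append,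
        List.count_cons, List.count_nil, beq_eq_false_iff_ne.mpr (Ne.symm hrq)]

theorem foldA_filter (records : List (String × String × Int)) :
    records.foldl organiseStepA PySem.Dict.empty =
      (records.filter pvGuard).foldl organiseStepA PySem.Dict.empty := by
  rw [List.foldl_filter]
  congr 1
  funext acc x
  by_cases h : pvGuard x = true
  · rw [if_pos h]
  · rw [if_neg h, stepA_not_guard _ _ (by simpa using h)]

theorem counts_eq_counter (records : List (String × String × Int)) :
    records.foldl (fun (counts : PySem.Dict (String × String × Int) Int) r =>
      match r with
      | (person, shop, day) =>
        if person ≠ "" ∧ shop ≠ "" ∧ (0 < day ∧ day < 8) then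
          counts.insert (person, shop, day) (counts.getD (person, shop, day) 0 + 1)
        else counts) PySem.Dict.empty = PySem.Dict.counter (records.filter pvGuard) := by
  rw [← PySem.Dict.foldl_insert_getD_add_one_eq_counter, List.foldl_filter]
  congr 1
  funext acc x
  obtain ⟨p, s, d⟩ := x
  by_cases h : pvGuard (p, s, d) = true
  · rw [if_pos h]
    simp only [pvGuard, decide_eq_true_eq] at h
    simp only [if_pos h]
  · rw [if_neg h]
    simp only [pvGuard, decide_eq_true_eq] at h
    simp only [if_neg h]

theorem main_eq (vs : List (String × String × Int)) (hg : ∀ r ∈ vs, pvGuard r = true) :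
    vs.foldl organiseStepA PySem.Dict.empty =
      (PySem.Dict.counter vs).items.foldl organiseStepB PySem.Dict.empty := by
  induction vs using List.reverseRecOn with
  | nil => rfl
  | append_singleton vs r ih =>
    have hgvs : ∀ x ∈ vs, pvGuard x = true := fun x hx => hg x (by simp [hx])
    have hgr : pvGuard r = true := hg r (by simp)
    rw [List.foldl_append, List.foldl_cons, List.foldl_nil, stepA_eq _ r hgr,
      pathGetD_foldA vs hgvs r, ih hgvs,
      PySem.Dict.items_counter vs, PySem.Dict.items_counter (vs ++ [r]),
      PySem.Set.ofList_append_singleton]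
    by_cases hr : r ∈ vs
    · -- r already counted: its entry's count is bumped in place
      rw [PySem.Set.add_of_mem ((PySem.Set.mem_ofList vs r).mpr hr)]
      obtain ⟨as, bs, hsplit⟩ := List.append_of_mem ((PySem.Set.mem_ofList vs r).mpr hr)
      have nd := PySem.Set.nodup_ofList (xs := vs)
      rw [hsplit] at nd
      rw [List.nodup_append] at nd
      have hras : r ∉ as := fun hx => nd.2.2 r hx r (by simp) rfl
      have hrbs : r ∉ bs := (List.nodup_cons.mp nd.2.1).1
      rw [hsplit]
      have hcas : List.map (fun k => (k, (List.count k (vs ++ [r]) : Int))) as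
          = List.map (fun k => (k, (List.count k vs : Int))) as := by
        apply List.map_congr_left
        intro k hk
        have : k ≠ r := fun h => hras (h ▸ hk)
        simp [List.count_append, Ne.symm this]
      have hcbs : List.map (fun k => (k, (List.count k (vs ++ [r]) : Int))) bs
          = List.map (fun k => (k, (List.count k vs : Int))) bs := by
        apply List.map_congr_left
        intro k hk
        have : k ≠ r := fun h => hrbs (h ▸ hk)
        simp [List.count_append, Ne.symm this]
      have hcr : (List.count r (vs ++ [r]) : Int) = (List.count r vs : Int) + 1 := by
        simp [List.count_append]
      simp only [List.map_append, List.map_cons, hcas, hcbs, hcr,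
        List.foldl_append, List.foldl_cons]
      rw [← stepB_stepB_self ((List.map (fun k => (k, (List.count k vs : Int))) as).foldl
          organiseStepB PySem.Dict.empty) r (List.count r vs : Int) ((List.count r vs : Int) + 1)]
      rw [foldB_insert_comm _ _ r _ (pathContains_stepB_self _ ((r, (List.count r vs : Int))))
        (fun q hq => by
          obtain ⟨k, hk, rfl⟩ := List.mem_map.mp hq
          exact fun h => hrbs (h ▸ hk))]
    · -- r is new: a fresh entry is appended at the end of the flat counter
      rw [PySem.Set.add_of_not_mem (fun h => hr ((PySem.Set.mem_ofList vs _).mp h))]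
      have hc0 : List.count r vs = 0 := List.count_eq_zero.mpr hr
      have hcas : List.map (fun k => (k, (List.count k (vs ++ [r]) : Int))) (PySem.Set.ofList vs)
          = List.map (fun k => (k, (List.count k vs : Int))) (PySem.Set.ofList vs) := by
        apply List.map_congr_left
        intro k hk
        have : k ≠ r := fun h => hr (h ▸ (PySem.Set.mem_ofList vs _).mp hk)
        simp [List.count_append, Ne.symm this]
      rw [List.map_append, hcas, List.map_cons, List.map_nil, List.foldl_append,
        List.foldl_cons, List.foldl_nil]
      have hc1 : (List.count r (vs ++ [r]) : Int) = (List.count r vs : Int) + 1 := by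
        simp [List.count_append]
      rw [hc1, hc0]

-- ===== VERDICT (by name: the statement is the Claim_ definition above) =====
theorem organise_spec : Claim_equal_organise := by
  intro records _
  unfold Spec_organise organise organise_alt
  rw [counts_eq_counter, foldA_filter,
    main_eq (records.filter pvGuard) (fun r hr => List.of_mem_filter hr)]
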